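-- pv_equiv track=rewrite | github.com/frame-lang/framec-test-env | fuzz/diff_harness/langs.py | _string_ranges
-- ===== SOURCE A (Python) =====
-- def _string_ranges(src: str) -> list[tuple[int, int]]:
--     """Return [start, end) byte ranges for every string literal in `src`.
--
--     Scans `"..."`, `'...'`, and `` `...` `` (JS/TS backtick strings),
--     handling `\\` escapes. Frame-source corpora don't embed exotic
--     string forms (raw strings, triple-quoted heredocs), so this simple
--     tracker is sufficient for the harness-level rewrites.
--
--     Comments are not tracked because generated Frame sources the harness
--     operates on never contain them."""
--     ranges: list[tuple[int, int]] = []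
--     n = len(src)
--     i = 0
--     while i < n:
--         c = src[i]
--         if c in ('"', "'", "`"):
--             start = i
--             quote = c
--             i += 1
--             while i < n:
--                 if src[i] == '\\' and i + 1 < n:
--                     i += 2
--                     continue
--                 if src[i] == quote:
--                     i += 1
--                     break
--                 i += 1
--             ranges.append((start, i))
--         else:
--             i += 1
--     return ranges
-- ===== SOURCE B (Python) =====
-- def _string_ranges(src: str) -> list[tuple[int, int]]:
--     """Single flat state-machine pass: track the active quote char and an
--     escaped flag instead of nested outer/inner scanning loops."""
--     ranges: list[tuple[int, int]] = []
--     quote = None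
--     escaped = False
--     start = 0
--     for i, c in enumerate(src):
--         if escaped:
--             escaped = False
--         elif quote is not None:
--             if c == '\\':
--                 escaped = True
--             elif c == quote:
--                 ranges.append((start, i + 1))
--                 quote = None
--         elif c in ('"', "'", "`"):
--             quote = c
--             start = i
--     if quote is not None:
--         ranges.append((start, len(src)))
--     return ranges
-- ===== Notes on version B (the rewrite author's own statement) =====
-- stated objective: simpler
-- what changed: Replaces A's nested while loops (outer scan for an opening quote, inner scan consuming the literal body) with a single flat pass over the characters maintaining quote/escaped state variables and flushing an unterminated trailing literal after the loop.
import Mathlib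
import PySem

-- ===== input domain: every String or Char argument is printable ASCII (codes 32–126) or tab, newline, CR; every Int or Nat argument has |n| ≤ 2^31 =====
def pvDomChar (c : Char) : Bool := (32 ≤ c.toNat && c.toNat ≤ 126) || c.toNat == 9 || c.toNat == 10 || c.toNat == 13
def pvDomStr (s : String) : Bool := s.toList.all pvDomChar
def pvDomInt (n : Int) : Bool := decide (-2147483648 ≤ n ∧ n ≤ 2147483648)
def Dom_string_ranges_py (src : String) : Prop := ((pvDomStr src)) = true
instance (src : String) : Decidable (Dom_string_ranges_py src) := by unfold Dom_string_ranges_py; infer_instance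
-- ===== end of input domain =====

-- B replaces A's nested outer/inner loops with one flat pass keeping quote/escaped state (objective: simpler decomposition, same cost).

-- ===== PORT A =====
-- inner while loop of A: advance i past the body of a literal opened with `quote`, return the final i
def srInner (cs : List Char) (n : Nat) (quote : Char) (i : Nat) : Nat :=
  if _h : i < n then
    if cs.getD i ' ' = '\\' ∧ i + 1 < n then srInner cs n quote (i + 2)
    else if cs.getD i ' ' = quote then i + 1
    else srInner cs n quote (i + 1)
  else i
termination_by n - i
decreasing_by all_goals omega

-- the inner loop never moves i backwards (used for srOuter's termination)
theorem srInner_ge (cs : List Char) (n : Nat) (q : Char) :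
    ∀ k i, n - i ≤ k → i ≤ srInner cs n q i := by
  intro k
  induction k with
  | zero =>
    intro i h
    unfold srInner
    rw [dif_neg (by omega)]
  | succ k ih =>
    intro i h
    unfold srInner
    split_ifs with h1 h2 h3
    · exact le_trans (by omega) (ih (i + 2) (by omega))
    · omega
    · exact le_trans (by omega) (ih (i + 1) (by omega))
    · exact le_rfl

-- outer while loop of A
def srOuter (cs : List Char) (n : Nat) (i : Nat) (acc : List (Int × Int)) : List (Int × Int) :=
  if _h : i < n then
    if cs.getD i ' ' = '"' ∨ cs.getD i ' ' = '\'' ∨ cs.getD i ' ' = '`' then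
      srOuter cs n (srInner cs n (cs.getD i ' ') (i + 1))
        (acc ++ [((i : Int), ((srInner cs n (cs.getD i ' ') (i + 1)) : Int))])
    else srOuter cs n (i + 1) acc
  else acc
termination_by n - i
decreasing_by
  · have := srInner_ge cs n (cs.getD i ' ') (n - (i + 1)) (i + 1) le_rfl
    omega
  · omega

def string_ranges_py (src : String) : List (Int × Int) :=
  srOuter src.toList src.toList.length 0 []

-- ===== PORT B =====
-- flat single loop of B: state = (quote : Option Char, escaped : Bool, start)
def srAlt (cs : List Char) (n : Nat) (i : Nat) (quote : Option Char) (escaped : Bool)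
    (start : Nat) (acc : List (Int × Int)) : List (Int × Int) :=
  if _h : i < n then
    if escaped then srAlt cs n (i + 1) quote false start acc
    else match quote with
      | some q =>
        if cs.getD i ' ' = '\\' then srAlt cs n (i + 1) quote true start acc
        else if cs.getD i ' ' = q then srAlt cs n (i + 1) none false start (acc ++ [((start : Int), ((i + 1 : Nat) : Int))])
        else srAlt cs n (i + 1) quote false start acc
      | none =>
        if cs.getD i ' ' = '"' ∨ cs.getD i ' ' = '\'' ∨ cs.getD i ' ' = '`' then srAlt cs n (i + 1) (some (cs.getD i ' ')) false i acc
        else srAlt cs n (i + 1) none false start acc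
  else match quote with
    | some _ => acc ++ [((start : Int), (n : Int))]
    | none => acc
termination_by n - i

def string_ranges_py_alt (src : String) : List (Int × Int) :=
  srAlt src.toList src.toList.length 0 none false 0 []

-- ===== PRECONDITION & SPEC =====
def Spec_string_ranges_py (src : String) (out : List (Int × Int)) : Prop := out = string_ranges_py_alt src
instance (src : String) (out : List (Int × Int)) : Decidable (Spec_string_ranges_py src out) := by unfold Spec_string_ranges_py; infer_instance

-- ===== CLAIM (what is proved, stated in full; the proofs are below) =====
def Claim_equal_string_ranges_py : Prop := ∀ (src : String), Dom_string_ranges_py src → Spec_string_ranges_py src (string_ranges_py src)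

-- ===== LEMMAS AND PROOFS =====

theorem srMain (cs : List Char) (n : Nat) :
    ∀ k i, i ≤ n → n - i ≤ k →
      ((∀ start acc, srAlt cs n i none false start acc = srOuter cs n i acc) ∧
       (∀ q start acc, (q = '"' ∨ q = '\'' ∨ q = '`') →
          srAlt cs n i (some q) false start acc =
            srOuter cs n (srInner cs n q i)
              (acc ++ [((start : Int), ((srInner cs n q i) : Int))]))) := by
  intro k
  induction k with
  | zero =>
    intro i hin hk
    have hi : i = n := by omega
    subst hi
    have hn : ¬ i < i := lt_irrefl _
    constructor
    · intro start acc
      rw [srAlt, dif_neg hn, srOuter, dif_neg hn]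
    · intro q start acc _
      rw [srInner, dif_neg hn, srAlt, dif_neg hn, srOuter, dif_neg hn]
  | succ k ih =>
    intro i hin hk
    by_cases hlt : i < n
    · constructor
      · intro start acc
        rw [srAlt, dif_pos hlt, srOuter, dif_pos hlt]
        by_cases hc : cs.getD i ' ' = '"' ∨ cs.getD i ' ' = '\'' ∨ cs.getD i ' ' = '`'
        · rw [if_pos hc, if_pos hc]
          exact (ih (i + 1) (by omega) (by omega)).2 (cs.getD i ' ') i acc hc
        · rw [if_neg hc, if_neg hc]
          exact (ih (i + 1) (by omega) (by omega)).1 start acc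
      · intro q start acc hq
        rw [srAlt, dif_pos hlt, srInner, dif_pos hlt]
        show (if cs.getD i ' ' = '\\' then srAlt cs n (i + 1) (some q) true start acc
              else if cs.getD i ' ' = q then
                srAlt cs n (i + 1) none false start (acc ++ [((start : Int), ((i + 1 : Nat) : Int))])
              else srAlt cs n (i + 1) (some q) false start acc) = _
        by_cases hb : cs.getD i ' ' = '\\'
        · by_cases h2 : i + 1 < n
          · rw [if_pos hb, if_pos (⟨hb, h2⟩ : cs.getD i ' ' = '\\' ∧ i + 1 < n)]
            rw [srAlt, dif_pos h2]
            show srAlt cs n (i + 1 + 1) (some q) false start acc = _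
            have h12 : i + 1 + 1 = i + 2 := rfl
            rw [h12]
            exact (ih (i + 2) (by omega) (by omega)).2 q start acc hq
          · have hcq : cs.getD i ' ' ≠ q := by
              rw [hb]; rcases hq with rfl | rfl | rfl <;> decide
            rw [if_pos hb, if_neg (fun h : cs.getD i ' ' = '\\' ∧ i + 1 < n => h2 h.2),
                if_neg hcq, srInner, dif_neg h2, srAlt, dif_neg h2]
            have he : i + 1 = n := by omega
            rw [he, srOuter, dif_neg (lt_irrefl n)]
        · by_cases hcq : cs.getD i ' ' = q
          · rw [if_neg hb, if_pos hcq, if_neg (fun h : cs.getD i ' ' = '\\' ∧ i + 1 < n => hb h.1),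
                if_pos hcq]
            exact (ih (i + 1) (by omega) (by omega)).1 start
              (acc ++ [((start : Int), ((i + 1 : Nat) : Int))])
          · rw [if_neg hb, if_neg hcq, if_neg (fun h : cs.getD i ' ' = '\\' ∧ i + 1 < n => hb h.1),
                if_neg hcq]
            exact (ih (i + 1) (by omega) (by omega)).2 q start acc hq
    · have hi : i = n := by omega
      subst hi
      have hn : ¬ i < i := lt_irrefl _
      constructor
      · intro start acc
        rw [srAlt, dif_neg hn, srOuter, dif_neg hn]
      · intro q start acc _
        rw [srInner, dif_neg hn, srAlt, dif_neg hn, srOuter, dif_neg hn]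

-- ===== VERDICT (by name: the statement is the Claim_ definition above) =====
theorem string_ranges_py_spec : Claim_equal_string_ranges_py := by
  intro src _
  unfold Spec_string_ranges_py string_ranges_py string_ranges_py_alt
  exact ((srMain src.toList src.toList.length src.toList.length 0 (Nat.zero_le _) le_rfl).1 0 []).symm
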